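-- pv_equiv track=rewrite | github.com/terrene-foundation/kailash-py | src/kailash/analysis/conditional_branch_analyzer.py | _find_dependency_chains
-- ===== SOURCE A (Python) =====
-- from typing import Any, Dict, List, Optional, Set
--
-- def _find_dependency_chains(
--     dependencies: Dict[str, List[str]]
-- ) -> List[List[str]]:
--     """
--     Find dependency chains in switch hierarchies.
--
--     Args:
--         dependencies: Dictionary mapping switch_id -> list of dependent switches
--
--     Returns:
--         List of dependency chains (each chain is a list of switch IDs)
--     """
--     chains = []
--     visited = set()
--
--     def build_chain(switch_id: str, current_chain: List[str]):
--         if switch_id in visited or switch_id in current_chain: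
--             return  # Avoid cycles
--
--         current_chain.append(switch_id)
--         deps = dependencies.get(switch_id, [])
--
--         if not deps:
--             # End of chain
--             if len(current_chain) > 1:
--                 chains.append(current_chain.copy())
--         else:
--             for dep in deps:
--                 build_chain(dep, current_chain.copy())
--
--     for switch_id in dependencies:
--         if switch_id not in visited:
--             build_chain(switch_id, [])
--             visited.add(switch_id)
--
--     return chains
-- ===== SOURCE B (Python) =====
-- def _find_dependency_chains(dependencies):
--     """Iterative rewrite: the recursive build_chain is replaced by an explicit
--     DFS stack of (switch_id, chain) frames, with deps pushed in reversed order
--     so the preorder left-to-right enumeration is preserved; blocked grows by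
--     one root after each traversal."""
--     chains = []
--     blocked = set()
--     for root in dependencies:
--         stack = [(root, [])]
--         while stack:
--             sid, chain = stack.pop()
--             if sid in blocked or sid in chain:
--                 continue
--             chain = chain + [sid]
--             deps = dependencies.get(sid, [])
--             if not deps:
--                 if len(chain) > 1:
--                     chains.append(chain)
--             else:
--                 for dep in reversed(deps):
--                     stack.append((dep, chain))
--         blocked.add(root)
--     return chains
-- ===== Notes on version B (the rewrite author's own statement) =====
-- stated objective: alternative
-- what changed: Replaces the recursive closure mutating a shared chains list and a visited set by an explicit DFS stack of (switch_id, chain) frames with deps pushed in reversed order, the i-th root blocked by the set of earlier keys.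
import Mathlib
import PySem

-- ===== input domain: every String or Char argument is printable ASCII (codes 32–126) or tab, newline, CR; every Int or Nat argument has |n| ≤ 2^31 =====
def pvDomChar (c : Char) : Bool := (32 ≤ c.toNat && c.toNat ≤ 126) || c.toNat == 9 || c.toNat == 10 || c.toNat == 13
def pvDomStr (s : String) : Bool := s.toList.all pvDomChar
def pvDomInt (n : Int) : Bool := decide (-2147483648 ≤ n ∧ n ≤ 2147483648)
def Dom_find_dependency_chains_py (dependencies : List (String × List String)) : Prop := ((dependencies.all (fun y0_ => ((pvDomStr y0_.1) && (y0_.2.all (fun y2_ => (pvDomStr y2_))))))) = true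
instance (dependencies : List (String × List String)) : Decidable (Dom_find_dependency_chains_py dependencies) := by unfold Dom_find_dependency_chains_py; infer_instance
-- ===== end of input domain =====

-- B replaces A's recursive build_chain closure by an explicit DFS stack of
-- (switch_id, chain) frames with reversed pushes, the blocked set growing by one
-- root after each traversal (objective: alternative decomposition, same cost).


-- ===== PORT A =====
-- build_chain: visited/current_chain guard, append, recurse over deps threading the
-- shared chains accumulator.  Fuel only makes the recursion structural; recursion
-- depth is bounded by the number of dict keys, so fuel d.size + 1 never runs out.
def pvChainsA (d : PySem.Dict String (List String)) : Nat → PySem.Set String → String → List String → List (List String) → List (List String)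
  | 0, _, _, _, chains => chains
  | fuel+1, visited, sid, chain, chains =>
    if sid ∈ visited ∨ sid ∈ chain then chains
    else
      let chain' := chain ++ [sid]
      let deps := d.getD sid []
      if deps.isEmpty then
        (if chain'.length > 1 then chains ++ [chain'] else chains)
      else
        deps.foldl (fun acc dep => pvChainsA d fuel visited dep chain' acc) chains

def find_dependency_chains_py (dependencies : List (String × List String)) : List (List String) :=
  let d := PySem.Dict.ofList dependencies
  (d.keys.foldl
    (fun (st : PySem.Set String × List (List String)) sid =>
      if sid ∈ st.1 then st
      else (PySem.Set.add st.1 sid, pvChainsA d (d.size + 1) st.1 sid [] st.2))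
    (([] : PySem.Set String), ([] : List (List String)))).2

-- ===== PORT B =====
-- Largest deps-list length stored in the dict; base of the pop-count fuel bound.
def pvMaxDeps (d : PySem.Dict String (List String)) : Nat :=
  d.values.foldl (fun m v => Nat.max m v.length) 0

-- The while-loop over the explicit stack (top = head).  Two fuels only make the
-- loop structural: the pop-count fuel g and the per-frame depth fuel f; with the
-- bounds chosen in find_dependency_chains_py_alt neither ever runs out.
-- `for dep in reversed(deps): stack.append(...)` is the foldl over deps.reverse.
def pvStackB (d : PySem.Dict String (List String)) (blocked : PySem.Set String) :
    Nat → List (Nat × String × List String) → List (List String) → List (List String)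
  | 0, _, out => out
  | _+1, [], out => out
  | g+1, (0, _, _) :: rest, out => pvStackB d blocked g rest out
  | g+1, (f+1, sid, chain) :: rest, out =>
    if sid ∈ blocked ∨ sid ∈ chain then pvStackB d blocked g rest out
    else
      let chain' := chain ++ [sid]
      let deps := d.getD sid []
      if deps.isEmpty then
        pvStackB d blocked g rest (if chain'.length > 1 then out ++ [chain'] else out)
      else
        pvStackB d blocked g (deps.reverse.foldl (fun st x => (f, x, chain') :: st) rest) out

def find_dependency_chains_py_alt (dependencies : List (String × List String)) : List (List String) :=
  let d := PySem.Dict.ofList dependencies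
  let F := d.size + 1
  let G := (pvMaxDeps d + 2) ^ F + 1
  (d.keys.foldl
    (fun (st : PySem.Set String × List (List String)) root =>
      (PySem.Set.add st.1 root, pvStackB d st.1 G [(F, root, [])] st.2))
    (([] : PySem.Set String), ([] : List (List String)))).2

-- ===== PRECONDITION & SPEC =====
def Spec_find_dependency_chains_py (dependencies : List (String × List String)) (out : List (List String)) : Prop := out = find_dependency_chains_py_alt dependencies
instance (dependencies : List (String × List String)) (out : List (List String)) : Decidable (Spec_find_dependency_chains_py dependencies out) := by unfold Spec_find_dependency_chains_py; infer_instance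

-- ===== CLAIM (what is proved, stated in full; the proofs are below) =====
def Claim_equal_find_dependency_chains_py : Prop := ∀ (dependencies : List (String × List String)), Dom_find_dependency_chains_py dependencies → Spec_find_dependency_chains_py dependencies (find_dependency_chains_py dependencies)

-- ===== LEMMAS AND PROOFS =====

-- Proof-side recursive reference: the chains produced below sid, as a pure value.
def pvChainsB (d : PySem.Dict String (List String)) : Nat → PySem.Set String → String → List String → List (List String)
  | 0, _, _, _ => []
  | fuel+1, blocked, sid, chain =>
    if sid ∈ blocked ∨ sid ∈ chain then []
    else
      let chain' := chain ++ [sid]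
      let deps := d.getD sid []
      if deps.isEmpty then
        (if chain'.length > 1 then [chain'] else [])
      else
        deps.flatMap (fun dep => pvChainsB d fuel blocked dep chain')

def pvFlat (d : PySem.Dict String (List String)) (blocked : PySem.Set String)
    (stack : List (Nat × String × List String)) : List (List String) :=
  stack.flatMap (fun e => pvChainsB d e.1 blocked e.2.1 e.2.2)

def pvMeasure (d : PySem.Dict String (List String)) (stack : List (Nat × String × List String)) : Nat :=
  (stack.map (fun e => (pvMaxDeps d + 2) ^ e.1)).sum

theorem length_le_pvMaxDeps (d : PySem.Dict String (List String)) (v : List String)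
    (hv : v ∈ d.values) : v.length ≤ pvMaxDeps d := by
  unfold pvMaxDeps
  have h : ∀ (l : List (List String)) (m : Nat), v ∈ l ∨ v.length ≤ m →
      v.length ≤ l.foldl (fun m v => Nat.max m v.length) m := by
    intro l
    induction l with
    | nil => intro m h; simpa using h.elim (fun h => (List.not_mem_nil h).elim) id
    | cons x xs ih =>
        intro m h
        rw [List.foldl_cons]
        apply ih
        rcases h with h | h
        · rcases List.mem_cons.mp h with h | h
          · right; subst h; exact Nat.le_max_right _ _
          · left; exact h
        · right; exact le_trans h (Nat.le_max_left _ _)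
  exact h d.values 0 (Or.inl hv)

theorem getD_length_le (d : PySem.Dict String (List String)) (sid : String) :
    (d.getD sid []).length ≤ pvMaxDeps d := by
  cases hg : d.get? sid with
  | none => simp [PySem.Dict.getD_eq_get?_getD, hg]
  | some v =>
      rw [PySem.Dict.getD_eq_get?_getD, hg]
      simp only [Option.getD_some]
      have hmem := PySem.Dict.mem_items_of_get?_eq_some d hg
      have hv : v ∈ d.values := by
        have : v ∈ d.items.map (·.2) := List.mem_map.mpr ⟨(sid, v), hmem, rfl⟩
        simpa [PySem.Dict.values] using this
      exact length_le_pvMaxDeps d v hv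

theorem push_eq (f : Nat) (chain' : List String) (deps : List String)
    (rest : List (Nat × String × List String)) :
    deps.reverse.foldl (fun st x => (f, x, chain') :: st) rest
      = deps.map (fun x => (f, x, chain')) ++ rest := by
  induction deps using List.reverseRecOn with
  | nil => simp
  | append_singleton xs x ih => simp

-- The stack machine, given enough pop fuel, appends exactly the flattened chains.
theorem pvStackB_eq (d : PySem.Dict String (List String)) (blocked : PySem.Set String) :
    ∀ (g : Nat) (stack : List (Nat × String × List String)) (out : List (List String)),
      pvMeasure d stack < g →
      pvStackB d blocked g stack out = out ++ pvFlat d blocked stack := by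
  intro g
  induction g with
  | zero => intro stack out h; exact absurd h (Nat.not_lt_zero _)
  | succ g ih =>
    intro stack out h
    match stack with
    | [] => simp [pvStackB, pvFlat]
    | (f, sid, chain) :: rest =>
      have hμ : pvMeasure d ((f, sid, chain) :: rest) = (pvMaxDeps d + 2) ^ f + pvMeasure d rest := by
        simp [pvMeasure]
      match f with
      | 0 =>
        have hrest : pvMeasure d rest < g := by
          rw [hμ] at h; simp [pow_zero] at h; omega
        rw [pvStackB, ih rest out hrest]
        simp [pvFlat, pvChainsB]
      | f+1 =>
        have hone : 1 ≤ (pvMaxDeps d + 2) ^ (f+1) := Nat.one_le_pow _ _ (by omega)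
        have hrest : pvMeasure d rest < g := by rw [hμ] at h; omega
        have hlen : (d.getD sid []).length ≤ pvMaxDeps d := getD_length_le d sid
        have hμ' : pvMeasure d (((d.getD sid []).map (fun x => (f, x, chain ++ [sid]))) ++ rest) < g := by
          have heq : pvMeasure d (((d.getD sid []).map (fun x => (f, x, chain ++ [sid]))) ++ rest)
              = (d.getD sid []).length * (pvMaxDeps d + 2) ^ f + pvMeasure d rest := by
            simp [pvMeasure, List.map_map, Function.comp_def, List.map_const', List.sum_replicate, smul_eq_mul,
              Nat.mul_comm]
          rw [heq]
          have hlt : (d.getD sid []).length * (pvMaxDeps d + 2) ^ f < (pvMaxDeps d + 2) ^ (f+1) := by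
            have h0 : 0 < (pvMaxDeps d + 2) ^ f := Nat.pow_pos (by omega)
            have hps : (pvMaxDeps d + 2) ^ (f+1) = (pvMaxDeps d + 2) ^ f * (pvMaxDeps d + 2) :=
              pow_succ _ _
            nlinarith [h0, hlen]
          rw [hμ] at h; omega
        simp only [pvStackB]
        split_ifs with h1 h2 h3
        · rw [ih rest out hrest]
          simp [pvFlat, pvChainsB, h1]
        · rw [ih rest _ hrest]
          have h3' : 0 < chain.length := by simp at h3; omega
          simp [pvFlat, pvChainsB, h1, h2, h3', List.append_assoc]
        · rw [ih rest _ hrest]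
          have h3' : chain = [] := by simpa using h3
          simp [pvFlat, pvChainsB, h2, h3']
        · rw [push_eq, ih _ out hμ']
          simp only [pvFlat, List.flatMap_append, List.flatMap_cons, pvChainsB,
            if_neg h1, if_neg h2, List.flatMap_map]

-- accumulator-threading A-helper = acc ++ pure reference helper, for every fuel
theorem pvChainsA_eq_append (d : PySem.Dict String (List String)) :
    ∀ (fuel : Nat) (v : PySem.Set String) (sid : String) (chain : List String)
      (chains : List (List String)),
      pvChainsA d fuel v sid chain chains = chains ++ pvChainsB d fuel v sid chain := by
  intro fuel
  induction fuel with
  | zero => intro v sid chain chains; simp [pvChainsA, pvChainsB]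
  | succ f ih =>
    intro v sid chain chains
    simp only [pvChainsA, pvChainsB]
    split_ifs with h1 h2 h3
    · simp
    · simp
    · simp
    · have hfold : ∀ (deps : List String) (acc : List (List String)),
          deps.foldl (fun acc dep => pvChainsA d f v dep (chain ++ [sid]) acc) acc
            = acc ++ deps.flatMap (fun dep => pvChainsB d f v dep (chain ++ [sid])) := by
        intro deps
        induction deps with
        | nil => intro acc; simp
        | cons x xs ihx =>
            intro acc
            rw [List.foldl_cons, ihx, ih, List.flatMap_cons, List.append_assoc]
      exact hfold _ _

-- both outer folds, step by step: A's guard never fires on distinct keys, and each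
-- root's traversal appends the same chains on both sides
theorem folds_eq (d : PySem.Dict String (List String)) :
    ∀ (suf : List String) (vis : PySem.Set String) (acc : List (List String)),
      suf.Nodup → (∀ x ∈ suf, x ∉ vis) →
      (suf.foldl
        (fun (st : PySem.Set String × List (List String)) sid =>
          if sid ∈ st.1 then st
          else (PySem.Set.add st.1 sid, pvChainsA d (d.size + 1) st.1 sid [] st.2))
        (vis, acc)).2
      = (suf.foldl
          (fun (st : PySem.Set String × List (List String)) root =>
            (PySem.Set.add st.1 root,
              pvStackB d st.1 ((pvMaxDeps d + 2) ^ (d.size + 1) + 1)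
                [(d.size + 1, root, [])] st.2))
          (vis, acc)).2 := by
  intro suf
  induction suf with
  | nil => intro vis acc _ _; rfl
  | cons sid rest ih =>
    intro vis acc hnd hout
    have hnot : sid ∉ vis := hout sid (by simp)
    rw [List.foldl_cons, List.foldl_cons, if_neg hnot, pvChainsA_eq_append,
        pvStackB_eq d vis _ _ _ (by simp [pvMeasure])]
    simp only [pvFlat, List.flatMap_cons, List.flatMap_nil, List.append_nil]
    exact ih (PySem.Set.add vis sid) _ (List.nodup_cons.mp hnd).2
      (fun x hx => by
        rw [PySem.Set.mem_add]
        push Not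
        exact ⟨hout x (by simp [hx]), (List.nodup_cons.mp hnd).1 ∘ (fun h => h ▸ hx)⟩)

theorem find_dependency_chains_py_eq (dependencies : List (String × List String)) :
    find_dependency_chains_py dependencies = find_dependency_chains_py_alt dependencies := by
  unfold find_dependency_chains_py find_dependency_chains_py_alt
  exact folds_eq (PySem.Dict.ofList dependencies) (PySem.Dict.ofList dependencies).keys [] []
    (PySem.Dict.nodup_keys_ofList dependencies) (by simp)

-- ===== VERDICT (by name: the statement is the Claim_ definition above) =====
theorem find_dependency_chains_py_spec : Claim_equal_find_dependency_chains_py := by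
  intro deps _
  exact find_dependency_chains_py_eq deps
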